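-- pv_equiv track=rewrite | github.com/andrewhead/scholarphi-definition-detector | data_loader.py | extract_annotated_labels_adhoc
-- ===== SOURCE A (Python) =====
-- def extract_annotated_labels_adhoc(sentence):
--     """
--     sentence = "we define A:TERM as a:D system:D for:D neural:D net:D
--     text = "we define A as a system for neural net"
--     slot_labels = "O O B-TERM O B-DEF I-DEF I-DEF I-DEF I-DEF "
--     label = "none"
--     """
--     text = []
--     slot_labels = []
--     label = "none"
--     for token in sentence.split():
--         if token.endswith(":T"):
--             text.append(token.split(":T")[0])
--             slot_labels.append("TERM")
--         elif token.endswith(":D"):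
--             text.append(token.split(":D")[0])
--             slot_labels.append("DEF")
--         else:
--             text.append(token)
--             slot_labels.append("O")
--
--     if "TERM" in slot_labels and "DEF" in slot_labels:
--         label = "definition"
--
--
--     # change TERM -> B-TERM and I-TERM
--     # change DEF -> B-DEF I-DEF
--     new_slot_labels = []
--     prev_l = 'O'
--     for l in slot_labels:
--         new_l = 'O'
--         if l == 'TERM':
--             if prev_l == 'TERM':
--                 new_l = 'I-TERM'
--             else:
--                 new_l = 'B-TERM'
--         if l == 'DEF':
--             if prev_l == 'DEF':
--                 new_l = 'I-DEF'
--             else: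
--                 new_l = 'B-DEF'
--         new_slot_labels.append(new_l)
--         prev_l = l
--     assert len(new_slot_labels) == len(slot_labels)
--
--     slot_labels = new_slot_labels
--
--     return text, slot_labels, label
-- ===== SOURCE B (Python) =====
-- def extract_annotated_labels_adhoc(sentence):
--     """Single-pass variant: classify each token, emit its BIO label immediately
--     from the remembered previous raw label, and track term/def presence with
--     two booleans -- no intermediate raw-label list, no second pass, no scans."""
--     text = []
--     slot_labels = []
--     prev = "O"
--     has_term = False
--     has_def = False
--     for token in sentence.split():
--         if token.endswith(":T"):
--             raw = "TERM"
--             text.append(token.split(":T")[0])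
--             has_term = True
--         elif token.endswith(":D"):
--             raw = "DEF"
--             text.append(token.split(":D")[0])
--             has_def = True
--         else:
--             raw = "O"
--             text.append(token)
--         if raw == "O":
--             slot_labels.append("O")
--         elif prev == raw:
--             slot_labels.append("I-" + raw)
--         else:
--             slot_labels.append("B-" + raw)
--         prev = raw
--     label = "definition" if has_term and has_def else "none"
--     return text, slot_labels, label
-- ===== Notes on version B (the rewrite author's own statement) =====
-- stated objective: simpler
-- what changed: B fuses A's two passes into a single loop that emits each BIO label directly from the remembered previous raw label and tracks term/def presence with two booleans, eliminating the intermediate raw-label list and the two membership scans.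
import Mathlib
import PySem

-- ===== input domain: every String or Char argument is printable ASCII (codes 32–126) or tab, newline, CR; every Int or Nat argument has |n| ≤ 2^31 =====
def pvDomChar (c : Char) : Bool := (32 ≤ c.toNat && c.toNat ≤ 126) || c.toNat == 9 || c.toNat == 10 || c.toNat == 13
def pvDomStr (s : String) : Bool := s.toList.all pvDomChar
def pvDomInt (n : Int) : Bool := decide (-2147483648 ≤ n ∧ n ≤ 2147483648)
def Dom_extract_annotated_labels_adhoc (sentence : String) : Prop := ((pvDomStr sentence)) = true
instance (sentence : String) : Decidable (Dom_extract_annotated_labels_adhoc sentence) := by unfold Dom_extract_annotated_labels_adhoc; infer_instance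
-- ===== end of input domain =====

-- B fuses A's two passes into one loop (BIO label emitted directly from the remembered
-- previous raw label; term/def presence tracked by two booleans), dropping the
-- intermediate raw-label list and the membership scans: objective 'simpler'.

-- ===== PORT A =====
-- first loop: append to text / slot_labels per token
def pvA_pass1 (tokens : List String) (acc : List String × List String) : List String × List String :=
  tokens.foldl (fun (st : List String × List String) token =>
    if PySem.Str.endswith token ":T" then
      (st.1 ++ [PySem.List.pyGetD ((PySem.Str.split? token ":T").getD []) 0 ""], st.2 ++ ["TERM"])
    else if PySem.Str.endswith token ":D" then
      (st.1 ++ [PySem.List.pyGetD ((PySem.Str.split? token ":D").getD []) 0 ""], st.2 ++ ["DEF"])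
    else
      (st.1 ++ [token], st.2 ++ ["O"])) acc

-- second loop: TERM/DEF → B-/I- labels, state = (new_slot_labels, prev_l)
def pvA_pass2 (slots : List String) (acc : List String × String) : List String × String :=
  slots.foldl (fun (st : List String × String) l =>
    let new_l := "O"
    let new_l := if l == "TERM" then (if st.2 == "TERM" then "I-TERM" else "B-TERM") else new_l
    let new_l := if l == "DEF" then (if st.2 == "DEF" then "I-DEF" else "B-DEF") else new_l
    (st.1 ++ [new_l], l)) acc

def extract_annotated_labels_adhoc (sentence : String) : List String × List String × String :=
  let p := pvA_pass1 (PySem.Str.split₀ sentence) ([], [])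
  let text := p.1
  let slot_labels := p.2
  let label := if slot_labels.contains "TERM" && slot_labels.contains "DEF" then "definition" else "none"
  let new_slot_labels := (pvA_pass2 slot_labels ([], "O")).1
  (text, new_slot_labels, label)

-- ===== PORT B =====
-- single loop, state = (text, slot_labels, prev, has_term, has_def)
def pvB_step (st : List String × List String × String × Bool × Bool) (token : String) :
    List String × List String × String × Bool × Bool :=
  let (text, slot_labels, prev, has_term, has_def) := st
  let (raw, text, has_term, has_def) :=
    if PySem.Str.endswith token ":T" then
      ("TERM", text ++ [PySem.List.pyGetD ((PySem.Str.split? token ":T").getD []) 0 ""], true, has_def)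
    else if PySem.Str.endswith token ":D" then
      ("DEF", text ++ [PySem.List.pyGetD ((PySem.Str.split? token ":D").getD []) 0 ""], has_term, true)
    else
      ("O", text ++ [token], has_term, has_def)
  let slot_labels :=
    if raw == "O" then slot_labels ++ ["O"]
    else if prev == raw then slot_labels ++ ["I-" ++ raw]
    else slot_labels ++ ["B-" ++ raw]
  (text, slot_labels, raw, has_term, has_def)

def extract_annotated_labels_adhoc_alt (sentence : String) : List String × List String × String :=
  let st := (PySem.Str.split₀ sentence).foldl pvB_step ([], [], "O", false, false)
  let (text, slot_labels, _, has_term, has_def) := st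
  let label := if has_term && has_def then "definition" else "none"
  (text, slot_labels, label)

-- ===== PRECONDITION & SPEC =====
def Spec_extract_annotated_labels_adhoc (sentence : String) (out : List String × List String × String) : Prop := out = extract_annotated_labels_adhoc_alt sentence
instance (sentence : String) (out : List String × List String × String) : Decidable (Spec_extract_annotated_labels_adhoc sentence out) := by unfold Spec_extract_annotated_labels_adhoc; infer_instance

-- ===== CLAIM (what is proved, stated in full; the proofs are below) =====
def Claim_equal_extract_annotated_labels_adhoc : Prop := ∀ (sentence : String), Dom_extract_annotated_labels_adhoc sentence → Spec_extract_annotated_labels_adhoc sentence (extract_annotated_labels_adhoc sentence)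

-- ===== LEMMAS AND PROOFS =====

-- proof-side characterisations of both programs over the token list
def pvWordOf (t : String) : String :=
  if PySem.Str.endswith t ":T" then PySem.List.pyGetD ((PySem.Str.split? t ":T").getD []) 0 ""
  else if PySem.Str.endswith t ":D" then PySem.List.pyGetD ((PySem.Str.split? t ":D").getD []) 0 ""
  else t

def pvRawOf (t : String) : String :=
  if PySem.Str.endswith t ":T" then "TERM"
  else if PySem.Str.endswith t ":D" then "DEF" else "O"

def pvNewL (prev l : String) : String :=
  if l = "TERM" then (if prev = "TERM" then "I-TERM" else "B-TERM")
  else if l = "DEF" then (if prev = "DEF" then "I-DEF" else "B-DEF")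
  else "O"

def pvBioList (prev : String) : List String → List String
  | [] => []
  | r :: rs => pvNewL prev r :: pvBioList r rs

def pvLastRaw (prev : String) : List String → String
  | [] => prev
  | r :: rs => pvLastRaw r rs

theorem pvA_pass1_eq (tokens : List String) : ∀ (a b : List String),
    pvA_pass1 tokens (a, b) = (a ++ tokens.map pvWordOf, b ++ tokens.map pvRawOf) := by
  induction tokens with
  | nil => intro a b; simp [pvA_pass1]
  | cons t ts ih =>
    intro a b
    by_cases h1 : PySem.Chars.endswith t.toList [':', 'T'] = true
    · simpa [pvA_pass1, h1, pvWordOf, pvRawOf] using ih (a ++ [pvWordOf t]) (b ++ ["TERM"])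
    · by_cases h2 : PySem.Chars.endswith t.toList [':', 'D'] = true
      · simpa [pvA_pass1, h1, h2, pvWordOf, pvRawOf] using ih (a ++ [pvWordOf t]) (b ++ ["DEF"])
      · simpa [pvA_pass1, h1, h2, pvWordOf, pvRawOf] using ih (a ++ [t]) (b ++ ["O"])

theorem pvA_pass2_fst (slots : List String) : ∀ (a : List String) (prev : String),
    (pvA_pass2 slots (a, prev)).1 = a ++ pvBioList prev slots := by
  induction slots with
  | nil => intro a prev; simp [pvA_pass2, pvBioList]
  | cons l ls ih =>
    intro a prev
    have h : (pvA_pass2 (l :: ls) (a, prev)) = pvA_pass2 ls (a ++ [pvNewL prev l], l) := by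
      simp only [pvA_pass2, List.foldl_cons]
      congr 1
      by_cases hT : l = "TERM"
      · by_cases hp : prev = "TERM" <;> simp [pvNewL, hT, hp]
      · by_cases hD : l = "DEF"
        · by_cases hp : prev = "DEF" <;> simp [pvNewL, hD, hp]
        · simp [pvNewL, hT, hD]
    rw [h, ih]
    simp [pvBioList]

theorem pvB_loop_eq (tokens : List String) :
    ∀ (tx bl : List String) (prev : String) (ht hd : Bool),
    tokens.foldl pvB_step (tx, bl, prev, ht, hd) =
      (tx ++ tokens.map pvWordOf,
       bl ++ pvBioList prev (tokens.map pvRawOf),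
       pvLastRaw prev (tokens.map pvRawOf),
       ht || (tokens.map pvRawOf).contains "TERM",
       hd || (tokens.map pvRawOf).contains "DEF") := by
  induction tokens with
  | nil => intro tx bl prev ht hd; simp [pvBioList, pvLastRaw]
  | cons t ts ih =>
    intro tx bl prev ht hd
    have hstep : pvB_step (tx, bl, prev, ht, hd) t =
        (tx ++ [pvWordOf t], bl ++ [pvNewL prev (pvRawOf t)], pvRawOf t,
         ht || decide ("TERM" = pvRawOf t), hd || decide ("DEF" = pvRawOf t)) := by
      by_cases h1 : PySem.Chars.endswith t.toList [':', 'T'] = true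
      · by_cases hp : prev = "TERM" <;>
          simp [pvB_step, h1, pvWordOf, pvRawOf, pvNewL, hp]
      · by_cases h2 : PySem.Chars.endswith t.toList [':', 'D'] = true
        · by_cases hp : prev = "DEF" <;>
            simp [pvB_step, h1, h2, pvWordOf, pvRawOf, pvNewL, hp]
        · simp [pvB_step, h1, h2, pvWordOf, pvRawOf, pvNewL]
    rw [List.foldl_cons, hstep, ih]
    simp [pvBioList, pvLastRaw, Bool.or_assoc, eq_comm]

-- ===== VERDICT (by name: the statement is the Claim_ definition above) =====
theorem extract_annotated_labels_adhoc_spec : Claim_equal_extract_annotated_labels_adhoc := by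
  intro sentence _
  unfold Spec_extract_annotated_labels_adhoc extract_annotated_labels_adhoc extract_annotated_labels_adhoc_alt
  simp only [pvA_pass1_eq, pvB_loop_eq, List.nil_append]
  simp [pvA_pass2_fst]
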